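-- pv_equiv track=rewrite | github.com/tsparaskevas/conty_app | conty_core/postprocess.py | first_srcset_url
-- ===== SOURCE A (Python) =====
-- def first_srcset_url(value: str | None) -> str:
--     if not value:
--         return ""
--     # value like: "url1 400w, url2 800w"
--     for part in str(value).split(","):
--         part = part.strip()
--         if not part:
--             continue
--         # take the first token before any size (400w, 2x, etc)
--         return part.split()[0]
--     return ""
-- ===== SOURCE B (Python) =====
-- def first_srcset_url(value):
--     if not value:
--         return ""
--     s = str(value)
--     seps = ", \t\n\r\x0b\x0c"
--     n = len(s)
--     i = 0
--     while i < n and s[i] in seps: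
--         i += 1
--     j = i
--     while j < n and s[j] not in seps:
--         j += 1
--     return s[i:j]
-- ===== Notes on version B (the rewrite author's own statement) =====
-- stated objective: simpler
-- what changed: Replaces the comma-split, per-part strip and inner whitespace-split with a single left-to-right scan that skips leading separators (comma/whitespace) and returns the first maximal run of non-separator characters.
import Mathlib
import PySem

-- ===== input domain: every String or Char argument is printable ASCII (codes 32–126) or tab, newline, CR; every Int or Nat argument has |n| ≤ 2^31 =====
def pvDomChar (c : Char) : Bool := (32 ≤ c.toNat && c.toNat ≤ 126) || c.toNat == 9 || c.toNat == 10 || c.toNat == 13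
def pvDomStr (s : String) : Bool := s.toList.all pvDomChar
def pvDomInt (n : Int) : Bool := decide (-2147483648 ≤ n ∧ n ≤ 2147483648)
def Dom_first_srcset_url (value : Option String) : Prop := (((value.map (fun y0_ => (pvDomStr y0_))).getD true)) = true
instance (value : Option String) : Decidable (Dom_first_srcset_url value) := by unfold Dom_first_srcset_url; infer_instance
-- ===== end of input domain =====

-- B replaces A's comma-split / strip / whitespace-split with one left-to-right scan
-- that skips leading separators and returns the first maximal non-separator run (objective: simpler).

-- ===== PORT A =====
-- the `for part in str(value).split(","): …` loop with its early return
def pvGoA : List String → String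
  | [] => ""                                   -- loop ends without returning: return ""
  | p :: rest =>
    let p' := PySem.Str.strip p                -- part = part.strip()
    if p' = "" then pvGoA rest                 -- if not part: continue
    else (PySem.Str.split₀ p').headD ""        -- return part.split()[0]; p' ≠ "" so the list is nonempty and [0] never raises

def first_srcset_url (value : Option String) : String :=
  match value with
  | none => ""                                 -- `if not value: return ""`
  | some s =>
    if s = "" then ""                          -- the other falsy case of `not value`
    else pvGoA ((PySem.Str.split? s ",").getD [])   -- str(value).split(","); sep "," is nonempty so split? is always some

-- ===== PORT B =====
def first_srcset_url_alt (value : Option String) : String :=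
  match value with
  | none => ""                                 -- `if not value: return ""`
  | some s =>
    if s = "" then ""
    else
      let seps : List Char := [',', ' ', '\t', '\n', '\r', '\x0B', '\x0C']   -- seps = ", \t\n\r\x0b\x0c"
      let cs := s.toList
      let rest := cs.dropWhile (fun c => seps.contains c)                    -- first while loop: skip leading separators
      String.ofList (rest.takeWhile (fun c => !seps.contains c))             -- second while loop + return s[i:j]

-- ===== PRECONDITION & SPEC =====
def Spec_first_srcset_url (value : Option String) (out : String) : Prop := out = first_srcset_url_alt value
instance (value : Option String) (out : String) : Decidable (Spec_first_srcset_url value out) := by unfold Spec_first_srcset_url; infer_instance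

-- ===== CLAIM (what is proved, stated in full; the proofs are below) =====
def Claim_equal_first_srcset_url : Prop := ∀ (value : Option String), Dom_first_srcset_url value → Spec_first_srcset_url value (first_srcset_url value)

-- ===== LEMMAS AND PROOFS =====

-- A-side separator predicate: comma or Python whitespace
def pvSep (c : Char) : Bool := c == ',' || PySem.Chars.isspace c
-- B-side separator predicate, as Source B tests it
def pvBSep (c : Char) : Bool := ([',', ' ', '\t', '\n', '\r', '\x0B', '\x0C'] : List Char).contains c

lemma pvCharEq_iff (c d : Char) : (c = d) ↔ c.toNat = d.toNat :=
  ⟨fun h => by rw [h], fun h => Char.ext (UInt32.toNat_inj.mp h)⟩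

-- on domain characters the two separator tests agree
lemma pvSep_eq_bsep (c : Char) (h : pvDomChar c = true) : pvBSep c = pvSep c := by
  simp only [pvDomChar, Bool.or_eq_true, Bool.and_eq_true, decide_eq_true_eq, beq_iff_eq] at h
  rw [Bool.eq_iff_iff]
  simp only [pvBSep, pvSep, PySem.Chars.isspace, Bool.or_eq_true, List.contains_eq_mem,
    decide_eq_true_eq, List.mem_cons, List.not_mem_nil, or_false, beq_iff_eq,
    Bool.and_eq_true, pvCharEq_iff,
    show (','.toNat) = 44 from rfl, show (' '.toNat) = 32 from rfl, show ('\t'.toNat) = 9 from rfl,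
    show ('\n'.toNat) = 10 from rfl, show ('\r'.toNat) = 13 from rfl, show ('\x0B'.toNat) = 11 from rfl,
    show ('\x0C'.toNat) = 12 from rfl]
  omega

-- split(",") as a simple structural recursion: (first part, later parts)
def pvSol : List Char → List Char × List (List Char)
  | [] => ([], [])
  | c :: cs =>
    let r := pvSol cs
    if c = ',' then ([], r.1 :: r.2) else (c :: r.1, r.2)

lemma pvSplitOn_go_eq (fuel : Nat) : ∀ (l cur : List Char) (accs : List (List Char)), l.length < fuel →
    PySem.Chars.splitOn.go [','] fuel l cur accs = accs.reverse ++ (cur.reverse ++ (pvSol l).1) :: (pvSol l).2 := by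
  induction fuel with
  | zero => intro l cur accs h; omega
  | succ fuel ih =>
    intro l cur accs h
    match l with
    | [] => simp [PySem.Chars.splitOn.go, pvSol]
    | c :: rest =>
      rw [PySem.Chars.splitOn.go]
      by_cases hc : c = ','
      · subst hc
        simp only [List.isPrefixOf, BEq.rfl, Bool.true_and, if_true]
        show PySem.Chars.splitOn.go [','] fuel rest [] (cur.reverse :: accs) = _
        rw [ih rest [] _ (by simpa using Nat.lt_of_succ_lt_succ h)]
        simp [pvSol]
      · have : ([','].isPrefixOf (c :: rest)) = false := by
          simp [List.isPrefixOf]; intro hh; exact absurd hh.symm hc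
        rw [this]
        simp only [Bool.false_eq_true, if_false]
        rw [ih rest (c :: cur) accs (by simpa using Nat.lt_of_succ_lt_succ h)]
        simp [pvSol, hc]

lemma pvSplitOn_eq (cs : List Char) : PySem.Chars.splitOn cs [','] = (pvSol cs).1 :: (pvSol cs).2 := by
  rw [PySem.Chars.splitOn, pvSplitOn_go_eq _ _ _ _ (Nat.lt_succ_self _)]
  simp

-- A's loop, on the character level
def pvCGoA : List (List Char) → List Char
  | [] => []
  | p :: rest =>
    let p' := PySem.Chars.strip p
    if p' = [] then pvCGoA rest else (PySem.Chars.split₀ p').headD []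

lemma pvGoA_map (ps : List (List Char)) : pvGoA (ps.map String.ofList) = String.ofList (pvCGoA ps) := by
  induction ps with
  | nil => rfl
  | cons p rest ih =>
    rw [List.map_cons, pvGoA, pvCGoA]
    have hs : PySem.Str.strip (String.ofList p) = String.ofList (PySem.Chars.strip p) := by
      rw [PySem.Str.strip, String.toList_ofList]
    rw [hs]
    by_cases h : PySem.Chars.strip p = []
    · rw [h, if_pos (show String.ofList ([] : List Char) = "" from rfl), if_pos rfl]; exact ih
    · have h2 : ¬ (String.ofList (PySem.Chars.strip p) = "") := by
        intro hh
        exact h (by simpa using congrArg String.toList hh)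
      simp only [h, h2, if_false]
      rw [PySem.Str.split₀, String.toList_ofList]
      rcases PySem.Chars.split₀ (PySem.Chars.strip p) with _ | ⟨w, ws⟩
      · rfl
      · simp

-- split₀.go threads its accumulator on the front
lemma pvSplit0_go_acc (l : List Char) : ∀ (cur : List Char) (acc : List (List Char)),
    PySem.Chars.split₀.go l cur acc = acc.reverse ++ PySem.Chars.split₀.go l cur [] := by
  induction l with
  | nil =>
    intro cur acc
    by_cases h : cur.isEmpty <;> simp [PySem.Chars.split₀.go, h]
  | cons c l ih =>
    intro cur acc
    by_cases hs : PySem.Chars.isspace c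
    · by_cases h : cur.isEmpty
      · rw [PySem.Chars.split₀.go, PySem.Chars.split₀.go]
        simp only [hs, h, if_true]
        exact ih [] acc
      · rw [PySem.Chars.split₀.go, PySem.Chars.split₀.go]
        simp only [hs, h, if_true, Bool.false_eq_true, if_false]
        rw [ih [] (cur.reverse :: acc), ih [] [cur.reverse]]
        simp
    · rw [PySem.Chars.split₀.go, PySem.Chars.split₀.go]
      simp only [hs, Bool.false_eq_true, if_false]
      exact ih (c :: cur) acc

-- the first word produced by split₀.go, when the current word is nonempty
lemma pvSplit0_go_head (l : List Char) : ∀ (cur : List Char), cur ≠ [] →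
    ∃ rest, PySem.Chars.split₀.go l cur [] = (cur.reverse ++ l.takeWhile (fun c => !PySem.Chars.isspace c)) :: rest := by
  induction l with
  | nil =>
    intro cur h
    refine ⟨[], ?_⟩
    rw [PySem.Chars.split₀.go]
    simp [List.isEmpty_iff, h]
  | cons c l ih =>
    intro cur h
    by_cases hs : PySem.Chars.isspace c
    · rw [PySem.Chars.split₀.go]
      simp only [hs, if_true, List.isEmpty_iff, h, if_false]
      rw [pvSplit0_go_acc]
      refine ⟨PySem.Chars.split₀.go l [] [], ?_⟩
      simp [List.takeWhile_cons, hs]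
    · rw [PySem.Chars.split₀.go]
      simp only [hs, Bool.false_eq_true, if_false]
      obtain ⟨rest, hr⟩ := ih (c :: cur) (by simp)
      refine ⟨rest, ?_⟩
      rw [hr]
      simp [List.takeWhile_cons, hs]

lemma pvSplit0_head (c : Char) (l : List Char) (h : PySem.Chars.isspace c = false) :
    (PySem.Chars.split₀ (c :: l)).headD [] = c :: l.takeWhile (fun c => !PySem.Chars.isspace c) := by
  rw [PySem.Chars.split₀, PySem.Chars.split₀.go]
  simp only [h, Bool.false_eq_true, if_false]
  obtain ⟨rest, hr⟩ := pvSplit0_go_head l [c] (by simp)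
  rw [hr]
  simp

-- dropping a non-whitespace head commutes with rstrip
lemma pvRstrip_cons (c : Char) (l : List Char) (h : PySem.Chars.isspace c = false) :
    PySem.Chars.rstrip (c :: l) = c :: PySem.Chars.rstrip l := by
  rw [PySem.Chars.rstrip, PySem.Chars.rstrip]
  rw [List.reverse_cons, List.dropWhile_append]
  by_cases he : (l.reverse.dropWhile PySem.Chars.isspace).isEmpty
  · simp only [he, if_true]
    simp only [List.isEmpty_iff] at he
    simp [he, List.dropWhile_cons, h]
  · simp only [he, Bool.false_eq_true, if_false]
    simp

-- a takeWhile whose predicate fails on whitespace ignores rstrip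
lemma pvTakeWhile_rstrip (l : List Char) :
    (PySem.Chars.rstrip l).takeWhile (fun c => !PySem.Chars.isspace c) = l.takeWhile (fun c => !PySem.Chars.isspace c) := by
  have hdecomp : l = PySem.Chars.rstrip l ++ (l.reverse.takeWhile PySem.Chars.isspace).reverse := by
    rw [PySem.Chars.rstrip, ← List.reverse_append, List.takeWhile_append_dropWhile, List.reverse_reverse]
  conv_rhs => rw [hdecomp]
  rw [List.takeWhile_append]
  split_ifs with hlen
  · have htw := (List.takeWhile_prefix (p := fun c => !PySem.Chars.isspace c) (l := PySem.Chars.rstrip l)).eq_of_length hlen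
    rw [htw]
    rcases hw : (l.reverse.takeWhile PySem.Chars.isspace).reverse with _ | ⟨c, w⟩
    · simp
    · have hc : PySem.Chars.isspace c = true := by
        have : c ∈ (l.reverse.takeWhile PySem.Chars.isspace).reverse := by rw [hw]; simp
        exact List.mem_takeWhile_imp (List.mem_reverse.mp this)
      simp [List.takeWhile_cons, hc]
  · rfl

lemma pvTakeWhile_congr {α : Type} (p q : α → Bool) (l : List α) (h : ∀ a ∈ l, p a = q a) :
    l.takeWhile p = l.takeWhile q := by
  induction l with
  | nil => rfl
  | cons a l ih =>
    rw [List.takeWhile_cons, List.takeWhile_cons, h a (by simp)]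
    split_ifs with hq
    · rw [ih (fun b hb => h b (by simp [hb]))]
    · rfl

lemma pvSol_fst (cs : List Char) : (pvSol cs).1 = cs.takeWhile (fun c => !(c == ',')) := by
  induction cs with
  | nil => rfl
  | cons c cs ih =>
    rw [pvSol, List.takeWhile_cons]
    by_cases h : c = ',' <;> simp [h, ih]

-- the main character-level equation: A's loop over the comma parts is B's scan
lemma pvMain (cs : List Char) :
    pvCGoA ((pvSol cs).1 :: (pvSol cs).2) = (cs.dropWhile pvSep).takeWhile (fun c => !pvSep c) := by
  induction cs with
  | nil => rfl
  | cons c cs ih =>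
    by_cases hc : c = ','
    · subst hc
      rw [pvSol]
      simp only [ite_true]
      have h1 : pvCGoA ([] :: (pvSol cs).1 :: (pvSol cs).2) = pvCGoA ((pvSol cs).1 :: (pvSol cs).2) := by
        rw [pvCGoA]; rfl
      rw [h1, ih, List.dropWhile_cons, if_pos (by simp [pvSep])]
    · by_cases hsp : PySem.Chars.isspace c
      · rw [pvSol]
        simp only [hc, if_false]
        have hstrip : PySem.Chars.strip (c :: (pvSol cs).1) = PySem.Chars.strip (pvSol cs).1 := by
          rw [PySem.Chars.strip, PySem.Chars.strip, PySem.Chars.lstrip, PySem.Chars.lstrip,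
            List.dropWhile_cons, if_pos hsp]
        have h1 : pvCGoA ((c :: (pvSol cs).1) :: (pvSol cs).2) = pvCGoA ((pvSol cs).1 :: (pvSol cs).2) := by
          rw [pvCGoA, pvCGoA, hstrip]
        rw [h1, ih, List.dropWhile_cons, if_pos (by simp [pvSep, hsp])]
      · -- c starts the first token
        rw [pvSol]
        simp only [hc, if_false]
        have hlstrip : PySem.Chars.lstrip (c :: (pvSol cs).1) = c :: (pvSol cs).1 := by
          rw [PySem.Chars.lstrip, List.dropWhile_cons, if_neg (by simp [hsp])]
        have hstrip : PySem.Chars.strip (c :: (pvSol cs).1) = c :: PySem.Chars.rstrip (pvSol cs).1 := by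
          rw [PySem.Chars.strip, hlstrip, pvRstrip_cons c _ (by simpa using hsp)]
        rw [pvCGoA, hstrip]
        simp only [reduceCtorEq, if_false]
        rw [pvSplit0_head c _ (by simpa using hsp), pvTakeWhile_rstrip, pvSol_fst,
          List.takeWhile_takeWhile]
        rw [List.dropWhile_cons, if_neg (by simp [pvSep, hc, hsp]),
          List.takeWhile_cons, if_pos (by simp [pvSep, hc, hsp])]
        congr 1
        apply pvTakeWhile_congr
        intro a _
        rw [Bool.eq_iff_iff, pvSep]
        cases hA : PySem.Chars.isspace a <;> cases hB : (a == ',') <;> simp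

-- on domain strings B's separator test computes A's
lemma pvTake_swap (cs : List Char) (h : cs.all pvDomChar = true) :
    cs.takeWhile (fun c => !pvBSep c) = cs.takeWhile (fun c => !pvSep c) := by
  apply pvTakeWhile_congr
  intro a ha
  rw [pvSep_eq_bsep a (by exact List.all_eq_true.mp h a ha)]

lemma pvBswap (cs : List Char) (h : cs.all pvDomChar = true) :
    (cs.dropWhile pvBSep).takeWhile (fun c => !pvBSep c) = (cs.dropWhile pvSep).takeWhile (fun c => !pvSep c) := by
  induction cs with
  | nil => rfl
  | cons c cs ih =>
    simp only [List.all_cons, Bool.and_eq_true] at h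
    rw [List.dropWhile_cons, List.dropWhile_cons, pvSep_eq_bsep c h.1]
    by_cases hs : pvSep c = true
    · rw [if_pos hs, if_pos hs]
      exact ih h.2
    · rw [if_neg hs, if_neg hs, List.takeWhile_cons, List.takeWhile_cons, pvSep_eq_bsep c h.1]
      by_cases ht : (!pvSep c) = true
      · rw [if_pos ht, if_pos ht, pvTake_swap cs h.2]
      · rw [if_neg ht, if_neg ht]

-- ===== VERDICT (by name: the statement is the Claim_ definition above) =====
theorem first_srcset_url_spec : Claim_equal_first_srcset_url := by
  intro value hdom
  unfold Spec_first_srcset_url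
  match value with
  | none => rfl
  | some s =>
    have hall : s.toList.all pvDomChar = true := by
      simpa [Dom_first_srcset_url, pvDomStr] using hdom
    rw [first_srcset_url, first_srcset_url_alt]
    by_cases he : s = ""
    · rw [if_pos he, if_pos he]
    · rw [if_neg he, if_neg he]
      have hsplit : PySem.Str.split? s "," = some ((PySem.Chars.splitOn s.toList [',']).map String.ofList) := by
        rw [PySem.Str.split?, PySem.Chars.split?]
        rfl
      rw [hsplit, Option.getD_some, pvGoA_map, pvSplitOn_eq, pvMain]
      have hb := pvBswap s.toList hall
      simp only [pvBSep] at hb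
      rw [← hb]
      rfl
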